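-- pv_equiv track=rewrite | github.com/RoyColicchio/marathon-planner-mobile | api/plans.py | apply_swaps
-- ===== SOURCE A (Python) =====
-- def apply_swaps(planned_map, swaps):
--     """Apply user day-swaps on top of the base planned map."""
--     result = dict(planned_map)
--     for ds, run in swaps.items():
--         if run is None:
--             result.pop(ds, None)
--         else:
--             result[ds] = run
--     return result
-- ===== SOURCE B (Python) =====
-- def apply_swaps(planned_map, swaps):
--     """Apply user day-swaps on top of the base planned map."""
--     base = dict(planned_map)
--     head = [(k, swaps.get(k, v)) for k, v in base.items()
--             if k not in swaps or swaps[k] is not None]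
--     tail = [(k, v) for k, v in swaps.items()
--             if v is not None and k not in base]
--     return dict(head + tail)
-- ===== Notes on version B (the rewrite author's own statement) =====
-- stated objective: alternative
-- what changed: Transposed the traversal: A iterates over the swaps mutating a result dict (pop on None, assign otherwise); B never mutates - it walks the base entries once, deciding each key by a lookup into swaps (drop if swapped to None, override if swapped, keep otherwise), then appends the swap entries whose keys are new, and returns dict(head + tail).
import Mathlib
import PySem

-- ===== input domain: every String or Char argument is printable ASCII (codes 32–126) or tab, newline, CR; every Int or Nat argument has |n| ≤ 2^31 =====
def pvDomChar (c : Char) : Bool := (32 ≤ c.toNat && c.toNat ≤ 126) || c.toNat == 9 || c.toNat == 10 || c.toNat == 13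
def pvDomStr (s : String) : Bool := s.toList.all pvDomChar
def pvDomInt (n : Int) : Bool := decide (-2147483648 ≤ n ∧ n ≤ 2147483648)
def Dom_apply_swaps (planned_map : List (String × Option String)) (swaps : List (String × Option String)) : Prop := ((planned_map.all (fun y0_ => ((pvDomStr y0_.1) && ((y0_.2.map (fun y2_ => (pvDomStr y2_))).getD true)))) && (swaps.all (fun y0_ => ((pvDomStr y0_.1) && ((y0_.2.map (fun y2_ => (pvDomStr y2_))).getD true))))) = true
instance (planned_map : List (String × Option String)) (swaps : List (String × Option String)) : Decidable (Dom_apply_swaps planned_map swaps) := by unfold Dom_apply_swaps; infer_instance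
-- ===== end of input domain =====

-- B transposes the traversal: instead of A's loop over swaps mutating a dict (pop/assign),
-- B walks the base entries once, deciding each key's fate by lookup into swaps, then appends
-- the genuinely new swap keys; alternative decomposition, same cost.


-- ===== PORT A =====
def apply_swaps (planned_map : List (String × Option String)) (swaps : List (String × Option String)) : List (String × Option String) :=
  -- result = dict(planned_map); for ds, run in swaps.items(): pop / assign; return result
  (swaps.foldl (fun result p =>
      match p.2 with
      | none => result.erase p.1                  -- result.pop(ds, None)
      | some run => result.insert p.1 (some run)  -- result[ds] = run
    ) (PySem.Dict.ofList planned_map)).items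

-- ===== PORT B =====
-- the comprehension's condition 'k not in swaps or swaps[k] is not None'
def pvKeep (sw : List (String × Option String)) (p : String × Option String) : Bool :=
  match (PySem.Dict.mk sw).get? p.1 with
  | none => true
  | some v => v.isSome

-- the comprehension's element '(k, swaps.get(k, v))'
def pvOv (sw : List (String × Option String)) (p : String × Option String) : String × Option String :=
  (p.1, ((PySem.Dict.mk sw).get? p.1).getD p.2)

def apply_swaps_alt (planned_map : List (String × Option String)) (swaps : List (String × Option String)) : List (String × Option String) :=
  let base := PySem.Dict.ofList planned_map
  let head := (base.items.filter (pvKeep swaps)).map (pvOv swaps)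
  let tail := swaps.filter (fun p => p.2.isSome && !(base.contains p.1))
  (PySem.Dict.ofList (head ++ tail)).items

-- ===== PRECONDITION & SPEC =====
-- swaps is a Python dict, whose keys are necessarily distinct; a raw pair list with
-- duplicate keys does not represent a dict (A would call .items() on a non-dict), so
-- Pre_ admits exactly the dict-representable swap lists.
def Pre_apply_swaps (planned_map : List (String × Option String)) (swaps : List (String × Option String)) : Prop :=
  (swaps.map Prod.fst).Nodup
instance (planned_map : List (String × Option String)) (swaps : List (String × Option String)) : Decidable (Pre_apply_swaps planned_map swaps) := by unfold Pre_apply_swaps; infer_instance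

def pvWitness_apply_swaps : (List (String × Option String)) × (List (String × Option String)) :=
  ([("mon", some "easy 5k"), ("tue", none)], [("mon", none), ("wed", some "tempo")])

def Spec_apply_swaps (planned_map : List (String × Option String)) (swaps : List (String × Option String)) (out : List (String × Option String)) : Prop := out = apply_swaps_alt planned_map swaps
instance (planned_map : List (String × Option String)) (swaps : List (String × Option String)) (out : List (String × Option String)) : Decidable (Spec_apply_swaps planned_map swaps out) := by unfold Spec_apply_swaps; infer_instance

-- ===== CLAIM (what is proved, stated in full; the proofs are below) =====
def Claim_equal_apply_swaps : Prop := ∀ (planned_map : List (String × Option String)) (swaps : List (String × Option String)), Dom_apply_swaps planned_map swaps → Pre_apply_swaps planned_map swaps → Spec_apply_swaps planned_map swaps (apply_swaps planned_map swaps)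

-- ===== LEMMAS AND PROOFS =====

-- pointwise congruence of a filter-then-map pipeline
theorem pv_fm_congr {α β : Type} (l : List α) (k1 k2 : α → Bool) (o1 o2 : α → β)
    (h : ∀ q ∈ l, k1 q = k2 q ∧ (k2 q = true → o1 q = o2 q)) :
    (l.filter k1).map o1 = (l.filter k2).map o2 := by
  induction l with
  | nil => rfl
  | cons a t iht =>
    obtain ⟨h1, h2⟩ := h a (by simp)
    have iht' := iht (fun q hq => h q (by simp [hq]))
    by_cases hk : k2 a = true
    · simp [h1, hk, h2 hk, iht']
    · simp only [Bool.not_eq_true] at hk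
      simp [h1, hk, iht']

theorem pv_contains_erase_of_ne {ν : Type} (d : PySem.Dict String ν) (k x : String) (h : x ≠ k) :
    (d.erase k).contains x = d.contains x := by
  simp only [PySem.Dict.erase, PySem.Dict.contains, List.any_filter]
  congr 1
  funext q
  by_cases hq : q.1 = x
  · simp [hq, h]
  · simp [hq]

-- pvKeep at a key absent from sw
theorem pv_keep_notmem (sw : List (String × Option String)) (k : String) (w : Option String)
    (h : k ∉ sw.map Prod.fst) : pvKeep sw (k, w) = true := by
  have : (PySem.Dict.mk sw).get? k = none := by
    rw [PySem.Dict.get?_eq_none_iff_not_mem_keys]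
    simpa using h
  simp [pvKeep, this]

theorem pv_ov_notmem (sw : List (String × Option String)) (k : String) (w : Option String)
    (h : k ∉ sw.map Prod.fst) : pvOv sw (k, w) = (k, w) := by
  have : (PySem.Dict.mk sw).get? k = none := by
    rw [PySem.Dict.get?_eq_none_iff_not_mem_keys]
    simpa using h
  simp [pvOv, this]

-- pvKeep/pvOv see through a cons whose key differs
theorem pv_keep_cons_ne (p : String × Option String) (ps : List (String × Option String))
    (q : String × Option String) (h : q.1 ≠ p.1) : pvKeep (p :: ps) q = pvKeep ps q := by
  obtain ⟨pk, pw⟩ := p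
  simp only [] at h
  simp [pvKeep, PySem.Dict.get?_mk_cons, Ne.symm h]

theorem pv_ov_cons_ne (p : String × Option String) (ps : List (String × Option String))
    (q : String × Option String) (h : q.1 ≠ p.1) : pvOv (p :: ps) q = pvOv ps q := by
  obtain ⟨pk, pw⟩ := p
  simp only [] at h
  simp [pvOv, PySem.Dict.get?_mk_cons, Ne.symm h]

-- main loop characterisation: A's fold over the swaps equals B's head ++ tail, for any base dict
theorem pv_main (sw : List (String × Option String)) (d : PySem.Dict String (Option String))
    (hnd : (sw.map Prod.fst).Nodup) :
    (sw.foldl (fun result p =>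
        match p.2 with
        | none => result.erase p.1
        | some run => result.insert p.1 (some run)) d).items
    = (d.items.filter (pvKeep sw)).map (pvOv sw)
      ++ sw.filter (fun p => p.2.isSome && !(d.contains p.1)) := by
  induction sw generalizing d with
  | nil =>
    show d.items = ((d.items.filter (fun _ => true)).map (fun q => (q.1, q.2))) ++ []
    simp
  | cons p ps ih =>
    obtain ⟨pk, pw⟩ := p
    have hnd0 : (pk :: ps.map Prod.fst).Nodup := by simpa using hnd
    have hp : pk ∉ ps.map Prod.fst := (List.nodup_cons.mp hnd0).1
    have hnd' : (ps.map Prod.fst).Nodup := (List.nodup_cons.mp hnd0).2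
    have hqs : ∀ q ∈ ps, q.1 ≠ pk := by
      intro q hq he
      exact hp (he ▸ List.mem_map_of_mem hq)
    cases hp2 : pw with
    | none =>
      -- A: result.pop(ds)
      subst hp2
      simp only [List.foldl_cons]
      rw [ih (d.erase pk) hnd']
      have htail : ps.filter (fun q => q.2.isSome && !((d.erase pk).contains q.1))
          = ps.filter (fun q => q.2.isSome && !(d.contains q.1)) := by
        apply List.filter_congr
        intro q hq
        rw [pv_contains_erase_of_ne d pk q.1 (hqs q hq)]
      have hhead : (((d.erase pk).items.filter (pvKeep ps)).map (pvOv ps))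
          = (d.items.filter (pvKeep ((pk, none) :: ps))).map (pvOv ((pk, none) :: ps)) := by
        simp only [PySem.Dict.erase, List.filter_filter]
        apply pv_fm_congr
        intro q _
        by_cases hqp : q.1 = pk
        · constructor
          · simp [pvKeep, PySem.Dict.get?_mk_cons, hqp]
          · intro habs
            exfalso
            simp [pvKeep, PySem.Dict.get?_mk_cons, hqp] at habs
        · constructor
          · simp [pv_keep_cons_ne (pk, none) ps q hqp, hqp]
          · intro _
            exact (pv_ov_cons_ne (pk, none) ps q hqp).symm
      rw [htail, hhead]
      simp
    | some run =>
      -- A: result[ds] = run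
      subst hp2
      simp only [List.foldl_cons]
      rw [ih (d.insert pk (some run)) hnd']
      have htail : ps.filter (fun q => q.2.isSome && !((d.insert pk (some run)).contains q.1))
          = ps.filter (fun q => q.2.isSome && !(d.contains q.1)) := by
        apply List.filter_congr
        intro q hq
        rw [PySem.Dict.contains_insert]
        have : (q.1 == pk) = false := by simpa using hqs q hq
        simp [this]
      rw [htail]
      by_cases hc : d.contains pk = true
      · -- overwrite in place
        rw [PySem.Dict.items_insert_of_contains _ _ hc]
        have hhead : (((d.items.map (fun q => if q.1 == pk then (pk, some run) else q)).filter
              (pvKeep ps)).map (pvOv ps))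
            = (d.items.filter (pvKeep ((pk, some run) :: ps))).map (pvOv ((pk, some run) :: ps)) := by
          rw [List.filter_map, List.map_map]
          apply pv_fm_congr
          intro q _
          by_cases hqp : q.1 = pk
          · have hk2 : pvKeep ((pk, some run) :: ps) q = true := by
              simp [pvKeep, PySem.Dict.get?_mk_cons, hqp]
            refine ⟨?_, fun _ => ?_⟩
            · simp only [Function.comp_apply, hqp, beq_self_eq_true, if_pos]
              rw [hk2, pv_keep_notmem ps pk (some run) hp]
            · simp only [Function.comp_apply, hqp, beq_self_eq_true, if_pos]
              rw [pv_ov_notmem ps pk (some run) hp]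
              simp [pvOv, PySem.Dict.get?_mk_cons, hqp]
          · have hne : (q.1 == pk) = false := by simpa using hqp
            refine ⟨?_, fun _ => ?_⟩
            · simp only [Function.comp_apply, hne, Bool.false_eq_true, if_neg, not_false_iff]
              rw [pv_keep_cons_ne (pk, some run) ps q hqp]
            · simp only [Function.comp_apply, hne, Bool.false_eq_true, if_neg, not_false_iff]
              rw [pv_ov_cons_ne (pk, some run) ps q hqp]
        rw [hhead]
        simp [hc]
      · -- fresh key appends
        have hc' : d.contains pk = false := by
          cases h : d.contains pk <;> simp_all
        rw [PySem.Dict.items_insert_of_not_contains _ _ hc']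
        have hdq : ∀ q ∈ d.items, q.1 ≠ pk := by
          intro q hq he
          have : d.contains pk = true := by
            simp only [PySem.Dict.contains]
            exact List.any_eq_true.mpr ⟨q, hq, by simp [he]⟩
          simp [this] at hc'
        have hhead : (((d.items ++ [(pk, some run)]).filter (pvKeep ps)).map (pvOv ps))
            = (d.items.filter (pvKeep ((pk, some run) :: ps))).map (pvOv ((pk, some run) :: ps))
              ++ [(pk, some run)] := by
          rw [List.filter_append, List.map_append]
          congr 1
          · apply pv_fm_congr
            intro q hq
            refine ⟨by rw [pv_keep_cons_ne (pk, some run) ps q (hdq q hq)], fun _ => ?_⟩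
            rw [pv_ov_cons_ne (pk, some run) ps q (hdq q hq)]
          · rw [show List.filter (pvKeep ps) [(pk, some run)]
                  = [(pk, some run)] by simp [pv_keep_notmem ps pk (some run) hp]]
            simp [pv_ov_notmem ps pk (some run) hp]
        rw [hhead]
        simp [hc']

-- dict() of a pair list with distinct keys keeps it as-is
theorem pv_ofList_items_of_nodup (l : List (String × Option String))
    (h : (l.map Prod.fst).Nodup) : (PySem.Dict.ofList l).items = l := by
  have := PySem.Dict.items_foldl_insert_fresh (l := l) (k := Prod.fst) (v := Prod.snd)
    (d := PySem.Dict.empty) (by intro a _; simp [PySem.Dict.contains_empty]) h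
  simpa [PySem.Dict.ofList, PySem.Dict.update, PySem.Dict.empty] using this

-- head ++ tail has distinct keys
theorem pv_nodup_head_tail (pm sw : List (String × Option String))
    (hsw : (sw.map Prod.fst).Nodup) :
    ((((PySem.Dict.ofList pm).items.filter (pvKeep sw)).map (pvOv sw)
      ++ sw.filter (fun p => p.2.isSome && !((PySem.Dict.ofList pm).contains p.1))).map Prod.fst).Nodup := by
  rw [List.map_append, List.nodup_append]
  refine ⟨?_, ?_, ?_⟩
  · have hkeys : ((PySem.Dict.ofList pm).items.map Prod.fst).Nodup :=
      PySem.Dict.nodup_keys_ofList pm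
    have hsub : ((((PySem.Dict.ofList pm).items.filter (pvKeep sw)).map (pvOv sw)).map Prod.fst).Sublist
        ((PySem.Dict.ofList pm).items.map Prod.fst) := by
      rw [List.map_map]
      have : (Prod.fst ∘ pvOv sw) = (Prod.fst : String × Option String → String) := by
        funext q; simp [pvOv]
      rw [this]
      exact List.Sublist.map _ List.filter_sublist
    exact hsub.nodup hkeys
  · have hsub : ((sw.filter (fun p => p.2.isSome && !((PySem.Dict.ofList pm).contains p.1))).map Prod.fst).Sublist
        (sw.map Prod.fst) := List.Sublist.map _ List.filter_sublist
    exact hsub.nodup hsw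
  · intro x hx y hy heq
    subst heq
    -- x is a key of the base dict, but tail keys are not contained in it
    have hx' : (PySem.Dict.ofList pm).contains x = true := by
      rw [List.map_map] at hx
      obtain ⟨q, hq, hqx⟩ := List.mem_map.mp hx
      have : q.1 = x := by simpa [pvOv] using hqx
      have hmem : q ∈ (PySem.Dict.ofList pm).items := List.mem_of_mem_filter hq
      simp only [PySem.Dict.contains]
      exact List.any_eq_true.mpr ⟨q, hmem, by simp [this]⟩
    obtain ⟨q, hq, hqx⟩ := List.mem_map.mp hy
    have hnc := (List.mem_filter.mp hq).2
    rw [hqx] at hnc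
    simp [hx'] at hnc

-- ===== VERDICT (by name: the statement is the Claim_ definition above) =====
theorem apply_swaps_spec : Claim_equal_apply_swaps := by
  intro pm sw _ hpre
  unfold Spec_apply_swaps apply_swaps apply_swaps_alt
  rw [pv_main sw (PySem.Dict.ofList pm) hpre,
      pv_ofList_items_of_nodup _ (pv_nodup_head_tail pm sw hpre)]
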